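-- pv_equiv track=rewrite | github.com/comeonboi/algorithm-practise | loong's code/leetcode/editor/cn/6338猴子碰撞的方法数.py | monkey_collision
-- ===== SOURCE A (Python) =====
-- def monkey_collision(n: int) -> int:
--     if n == 1:
--         return 0
--     if n == 2:
--         return 2
--     f = [0, 2]
--     for i in range(2, n):
--         f.append((i - 1) * f[i - 1] + (i - 1) * (i - 2))
--     return f[n - 1]
-- ===== SOURCE B (Python) =====
-- def monkey_collision(n: int) -> int:
--     # closed form: answer = F(m) with m = n-1, F(m) = 2*(m-1)! + sum_{j=0}^{m-3} (m-1)!/j!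
--     if n <= 1:
--         return 0
--     if n == 2:
--         return 2
--     m = n - 1
--     fact = 1
--     for k in range(2, m):
--         fact *= k                 # fact = (m-1)!
--     total = 2 * fact
--     term = fact                   # term = (m-1)!/j!, starting at j = 0
--     for j in range(m - 2):
--         total += term
--         term //= j + 1            # exact: (m-1)!/j! is divisible by j+1 for j < m-2
--     return total
-- ===== Notes on version B (the rewrite author's own statement) =====
-- stated objective: alternative
-- what changed: Replaces A's list-building linear recurrence with the derived closed form F(m) = 2*(m-1)! + sum_{j=0}^{m-3} (m-1)!/j! (m = n-1), computed with a running factorial and a running exact-integer-division term, with no list kept.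
-- intended difference: At n = 0 A returns 2 via accidental negative-index wraparound (f[-1] of the seed list); B returns 0, the natural value for no monkeys. — e.g. on monkey_collision(0): A returns 2, B returns 0
-- outside the precondition, e.g. on monkey_collision(-2): A raises IndexError, B returns 0
import Mathlib
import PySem

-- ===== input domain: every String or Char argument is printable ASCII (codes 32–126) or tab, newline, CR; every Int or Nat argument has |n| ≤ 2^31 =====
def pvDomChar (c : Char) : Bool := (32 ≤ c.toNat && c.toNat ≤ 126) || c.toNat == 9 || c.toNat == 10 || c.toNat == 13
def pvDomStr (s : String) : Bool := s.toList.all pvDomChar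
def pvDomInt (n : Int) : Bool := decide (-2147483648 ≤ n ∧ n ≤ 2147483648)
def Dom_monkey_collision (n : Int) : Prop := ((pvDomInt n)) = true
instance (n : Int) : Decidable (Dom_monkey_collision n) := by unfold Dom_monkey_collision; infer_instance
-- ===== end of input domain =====

-- B replaces A's step-by-step recurrence list with the closed form
-- F(m) = 2*(m-1)! + sum_{j=0}^{m-3} (m-1)!/j! (m = n-1), built by a running
-- factorial and a running exact-integer-division term (objective: alternative).

-- ===== PORT A =====
def monkey_collision (n : Int) : Int :=
  if n = 1 then 0
  else if n = 2 then 2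
  else
    let f := (PySem.List.pyRange 2 n 1).foldl
      (fun f i => f ++ [(i - 1) * PySem.List.pyGetD f (i - 1) 0 + (i - 1) * (i - 2)]) [0, 2]
    PySem.List.pyGetD f (n - 1) 0   -- Python raises IndexError for n ≤ -2; Pre_ excludes those

-- ===== PORT B =====
def monkey_collision_alt (n : Int) : Int :=
  if n ≤ 1 then 0
  else if n = 2 then 2
  else
    let m := n - 1
    let fact := (PySem.List.pyRange 2 m 1).foldl (fun a k => a * k) 1
    let res := (PySem.List.pyRange 0 (m - 2) 1).foldl
      (fun tt j => (tt.1 + tt.2, PySem.Int.floordiv tt.2 (j + 1))) (2 * fact, fact)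
    res.1

-- ===== PRECONDITION & SPEC =====
-- Pre_ excludes n ≤ -2, where Python A raises IndexError (f[n-1] out of range).
def Pre_monkey_collision (n : Int) : Prop := -1 ≤ n
instance (n : Int) : Decidable (Pre_monkey_collision n) := by unfold Pre_monkey_collision; infer_instance
def pvWitness_monkey_collision : Int := 5

-- At n = 0 A returns 2 via accidental negative-index wraparound (f[-1]); B returns
-- the natural 0 (no monkeys, no collision arrangements), the intended value.
def D_monkey_collision (n : Int) : Prop := n = 0
instance (n : Int) : Decidable (D_monkey_collision n) := by unfold D_monkey_collision; infer_instance
def Spec_monkey_collision (n : Int) (out : Int) : Prop := ¬ D_monkey_collision n → out = monkey_collision_alt n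
instance (n : Int) (out : Int) : Decidable (Spec_monkey_collision n out) := by unfold Spec_monkey_collision; infer_instance
def pvDiffWitness_monkey_collision : Int := 0
def pvDiffWitnessOut_monkey_collision : Int × Int := (2, 0)

-- ===== CLAIM (what is proved, stated in full; the proofs are below) =====
def Claim_unchanged_monkey_collision : Prop := ∀ (n : Int), Dom_monkey_collision n → Pre_monkey_collision n → Spec_monkey_collision n (monkey_collision n)
def Claim_changed_monkey_collision : Prop := Dom_monkey_collision (pvDiffWitness_monkey_collision) ∧ Pre_monkey_collision (pvDiffWitness_monkey_collision) ∧ D_monkey_collision (pvDiffWitness_monkey_collision) ∧ monkey_collision (pvDiffWitness_monkey_collision) = pvDiffWitnessOut_monkey_collision.1 ∧ monkey_collision_alt (pvDiffWitness_monkey_collision) = pvDiffWitnessOut_monkey_collision.2 ∧ pvDiffWitnessOut_monkey_collision.1 ≠ pvDiffWitnessOut_monkey_collision.2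
def Claim_exact_monkey_collision : Prop := ∀ (n : Int), Dom_monkey_collision n → Pre_monkey_collision n → D_monkey_collision n → monkey_collision n ≠ monkey_collision_alt n

-- ===== LEMMAS AND PROOFS =====

-- the recurrence A computes: gA i = f[i]
def gA : Nat → Int
  | 0 => 0
  | 1 => 2
  | (i + 2) => ((i : Int) + 1) * gA (i + 1) + ((i : Int) + 1) * (i : Int)

-- sB m j = (m-1)!/j!  (exact: j! divides (m-1)! for j ≤ m-1)
def sB (m j : Nat) : Nat := (m - 1).factorial / j.factorial

-- S m c = sum of the first c terms
def S (m c : Nat) : Int := ∑ j ∈ Finset.range c, (sB m j : Int)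

theorem fold_a (k : Nat) :
    (PySem.List.pyRange 2 (2 + (k : Int)) 1).foldl
      (fun f i => f ++ [(i - 1) * PySem.List.pyGetD f (i - 1) 0 + (i - 1) * (i - 2)]) [0, 2]
      = (List.range (k + 2)).map gA := by
  induction k with
  | zero => simp
            decide
  | succ k ih =>
    have h : (2 : Int) + (k + 1 : Nat) = (2 + (k : Int)) + 1 := by push_cast; ring
    rw [h, PySem.List.pyRange_one_succ_right (by omega), List.foldl_append, ih]
    simp only [List.foldl_cons, List.foldl_nil]
    have hget : PySem.List.pyGetD ((List.range (k + 2)).map gA) (2 + (k : Int) - 1) 0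
        = gA (k + 1) := by
      have : (2 + (k : Int) - 1) = ((k + 1 : Nat) : Int) := by push_cast; ring
      rw [this, PySem.List.pyGetD_natCast]
      simp [List.getD]
    rw [hget]
    rw [List.range_succ (n := k + 2), List.map_append]
    congr 1
    simp [gA]
    push_cast; ring

theorem fold_fact (k : Nat) :
    (PySem.List.pyRange 2 (2 + (k : Int)) 1).foldl (fun a k => a * k) 1
      = ((k + 1).factorial : Int) := by
  induction k with
  | zero => simp [Nat.factorial]
  | succ k ih =>
    have h : (2 : Int) + (k + 1 : Nat) = (2 + (k : Int)) + 1 := by push_cast; ring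
    rw [h, PySem.List.pyRange_one_succ_right (by omega), List.foldl_append, ih]
    simp [Nat.factorial_succ]
    push_cast; ring

theorem sB_zero (m : Nat) : sB m 0 = (m - 1).factorial := by simp [sB]

theorem sB_eq (a j : Nat) : sB (a + 1) j = a.factorial / j.factorial := by
  unfold sB; norm_num

theorem sB_step (m j : Nat) (h : j + 1 ≤ m - 1) : sB m j = (j + 1) * sB m (j + 1) := by
  unfold sB
  obtain ⟨q, hq⟩ := Nat.factorial_dvd_factorial h
  rw [hq, Nat.mul_div_cancel_left q (Nat.factorial_pos (j + 1)), Nat.factorial_succ,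
      mul_assoc, Nat.mul_div_assoc _ (dvd_mul_right j.factorial q),
      Nat.mul_div_cancel_left _ (Nat.factorial_pos j)]

theorem floordiv_sB (m j : Nat) (h : j + 1 ≤ m - 1) :
    PySem.Int.floordiv (sB m j : Int) ((j : Int) + 1) = (sB m (j + 1) : Int) := by
  rw [PySem.Int.floordiv_eq_ediv_of_pos (by omega)]
  have hcast : (sB m j : Int) = ((j : Int) + 1) * (sB m (j + 1) : Int) := by
    rw [sB_step m j h]; push_cast; ring
  rw [hcast, Int.mul_ediv_cancel_left _ (by omega)]

theorem fold_b (m : Nat) (hm : 2 ≤ m) (c : Nat) (hc : c ≤ m - 2) :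
    (PySem.List.pyRange 0 (c : Int) 1).foldl
      (fun tt j => (tt.1 + tt.2, PySem.Int.floordiv tt.2 (j + 1)))
      (2 * ((m - 1).factorial : Int), ((m - 1).factorial : Int))
      = (2 * ((m - 1).factorial : Int) + S m c, (sB m c : Int)) := by
  induction c with
  | zero => simp [S, sB_zero]
  | succ c ih =>
    have h : ((c + 1 : Nat) : Int) = (c : Int) + 1 := by push_cast; ring
    rw [h, PySem.List.pyRange_one_succ_right (by omega), List.foldl_append,
        ih (by omega)]
    simp only [List.foldl_cons, List.foldl_nil]
    rw [Prod.mk.injEq]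
    refine ⟨?_, floordiv_sB m c (by omega)⟩
    unfold S; rw [Finset.sum_range_succ]; ring

-- the closed form equals the recurrence
theorem gA_closed (k : Nat) :
    gA (k + 2) = 2 * ((k + 1).factorial : Int) + S (k + 2) k := by
  induction k with
  | zero => decide
  | succ k ih =>
    have hrec : gA (k + 3) = ((k : Int) + 2) * gA (k + 2) + ((k : Int) + 2) * ((k : Int) + 1) := by
      show gA ((k + 1) + 2) = _
      rw [gA]; push_cast; ring
    rw [hrec, ih]
    have hmul : ∀ j : Nat, j ≤ k + 1 → ((k : Int) + 2) * (sB (k + 2) j : Int) = (sB (k + 3) j : Int) := by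
      intro j hj
      rw [show k + 2 = (k + 1) + 1 from rfl, show k + 3 = (k + 2) + 1 from rfl, sB_eq, sB_eq]
      obtain ⟨q, hq⟩ := Nat.factorial_dvd_factorial (show j ≤ k + 1 from hj)
      have h2 : (k + 2).factorial = j.factorial * ((k + 2) * q) := by
        rw [Nat.factorial_succ, hq]; ring
      rw [hq, h2, Nat.mul_div_cancel_left _ (Nat.factorial_pos j),
          Nat.mul_div_cancel_left _ (Nat.factorial_pos j)]
      push_cast; ring
    have hS : ((k : Int) + 2) * S (k + 2) k = S (k + 3) k := by
      unfold S
      rw [Finset.mul_sum]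
      exact Finset.sum_congr rfl (fun j hj => hmul j (by
        have := Finset.mem_range.mp hj; omega))
    have hlast : ((k : Int) + 2) * ((k : Int) + 1) = (sB (k + 3) k : Int) := by
      rw [show k + 3 = (k + 2) + 1 from rfl, sB_eq]
      have h2 : (k + 2).factorial = k.factorial * ((k + 2) * (k + 1)) := by
        rw [Nat.factorial_succ, Nat.factorial_succ]; ring
      rw [h2, Nat.mul_div_cancel_left _ (Nat.factorial_pos k)]
      push_cast; ring
    have hfactN : (k + 2) * (k + 1).factorial = (k + 2).factorial := (Nat.factorial_succ (k + 1)).symm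
    have hfact : ((k : Int) + 2) * ((k + 1).factorial : Nat) = ((k + 2).factorial : Nat) := by
      rw [← hfactN]; push_cast; ring
    calc ((k : Int) + 2) * (2 * ((k + 1).factorial : Int) + S (k + 2) k) + ((k : Int) + 2) * ((k : Int) + 1)
        = 2 * (((k : Int) + 2) * ((k + 1).factorial : Int)) + ((k : Int) + 2) * S (k + 2) k + ((k : Int) + 2) * ((k : Int) + 1) := by ring
      _ = 2 * ((k + 2).factorial : Int) + S (k + 3) k + (sB (k + 3) k : Int) := by
            rw [hfact, hS, hlast]
      _ = 2 * ((k + 2).factorial : Int) + S (k + 3) (k + 1) := by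
            unfold S; rw [Finset.sum_range_succ]; ring

theorem main_eq (n : Int) (hn : 3 ≤ n) : monkey_collision n = monkey_collision_alt n := by
  obtain ⟨k, hk⟩ : ∃ k : Nat, n = (k : Int) + 3 := ⟨(n - 3).toNat, by omega⟩
  subst hk
  unfold monkey_collision monkey_collision_alt
  rw [if_neg (by omega), if_neg (by omega), if_neg (by omega), if_neg (by omega)]
  simp only []
  -- A side
  have hA2 : (k : Int) + 3 = 2 + ((k + 1 : Nat) : Int) := by push_cast; ring
  rw [hA2, fold_a (k + 1)]
  have hidx : 2 + ((k + 1 : Nat) : Int) - 1 = ((k + 2 : Nat) : Int) := by push_cast; ring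
  rw [hidx, PySem.List.pyGetD_natCast]
  have hgetA : ((List.range (k + 1 + 2)).map gA).getD (k + 2) 0 = gA (k + 2) := by
    simp [List.getD]
  rw [hgetA]
  -- B side
  have hm : ((k + 2 : Nat) : Int) = 2 + ((k : Nat) : Int) := by push_cast; ring
  rw [hm, fold_fact k]
  have hc : 2 + ((k : Nat) : Int) - 2 = ((k : Nat) : Int) := by push_cast; ring
  have hfb := fold_b (k + 2) (by omega) k (by omega)
  simp only [show k + 2 - 1 = k + 1 from rfl] at hfb
  rw [hc, hfb]
  exact gA_closed k

-- ===== VERDICT (by name: the statement is the Claim_ definition above) =====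
theorem monkey_collision_spec : Claim_unchanged_monkey_collision := by
  intro n _ hpre hnd
  by_cases h3 : 3 ≤ n
  · exact main_eq n h3
  · unfold Pre_monkey_collision at hpre
    push_neg at h3
    interval_cases n
    · decide
    · exact absurd rfl hnd
    · decide
    · decide

theorem monkey_collision_changed : Claim_changed_monkey_collision := by
  unfold Claim_changed_monkey_collision; decide

theorem monkey_collision_tight : Claim_exact_monkey_collision := by
  intro n _ _ hd
  subst hd
  decide
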